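-- pv_equiv track=rewrite | github.com/Nisheshan167/Agentic-AI-workflow-for-automated-trading | app.py | simple_sentiment_label
-- ===== SOURCE A (Python) =====
-- def simple_sentiment_label(text: str) -> str:
--     positive_words = {
--         "beat", "beats", "surge", "rally", "gain", "gains", "growth", "strong",
--         "upgrade", "record", "profit", "profits", "optimism", "bullish",
--         "expands", "outperform", "rebound", "boost", "positive"
--     }
--     negative_words = {
--         "miss", "misses", "fall", "falls", "drop", "drops", "weak", "downgrade",
--         "loss", "losses", "lawsuit", "risk", "risks", "bearish", "cut", "cuts",
--         "decline", "slump", "warning", "negative"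
--     }
--
--     tokens = {token.strip(".,:;!?()[]{}\"'").lower() for token in text.split()}
--     pos_score = len(tokens & positive_words)
--     neg_score = len(tokens & negative_words)
--
--     if pos_score > neg_score:
--         return "Positive"
--     if neg_score > pos_score:
--         return "Negative"
--     return "Neutral"
-- ===== SOURCE B (Python) =====
-- def simple_sentiment_label(text: str) -> str:
--     lexicon = {
--         "beat": 1, "beats": 1, "surge": 1, "rally": 1, "gain": 1, "gains": 1,
--         "growth": 1, "strong": 1, "upgrade": 1, "record": 1, "profit": 1,
--         "profits": 1, "optimism": 1, "bullish": 1, "expands": 1,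
--         "outperform": 1, "rebound": 1, "boost": 1, "positive": 1,
--         "miss": -1, "misses": -1, "fall": -1, "falls": -1, "drop": -1,
--         "drops": -1, "weak": -1, "downgrade": -1, "loss": -1, "losses": -1,
--         "lawsuit": -1, "risk": -1, "risks": -1, "bearish": -1, "cut": -1,
--         "cuts": -1, "decline": -1, "slump": -1, "warning": -1, "negative": -1,
--     }
--     score = 0
--     for token in {t.strip(".,:;!?()[]{}\"'").lower() for t in text.split()}:
--         score += lexicon.get(token, 0)
--     if score > 0:
--         return "Positive"
--     if score < 0:
--         return "Negative"
--     return "Neutral"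
-- ===== Notes on version B (the rewrite author's own statement) =====
-- stated objective: simpler
-- what changed: Replaces the two positive/negative word sets, two set intersections and a count comparison with a single signed lexicon dict and one net-score accumulation over the unique tokens, labelling by the sign of the net score.
import Mathlib
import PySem

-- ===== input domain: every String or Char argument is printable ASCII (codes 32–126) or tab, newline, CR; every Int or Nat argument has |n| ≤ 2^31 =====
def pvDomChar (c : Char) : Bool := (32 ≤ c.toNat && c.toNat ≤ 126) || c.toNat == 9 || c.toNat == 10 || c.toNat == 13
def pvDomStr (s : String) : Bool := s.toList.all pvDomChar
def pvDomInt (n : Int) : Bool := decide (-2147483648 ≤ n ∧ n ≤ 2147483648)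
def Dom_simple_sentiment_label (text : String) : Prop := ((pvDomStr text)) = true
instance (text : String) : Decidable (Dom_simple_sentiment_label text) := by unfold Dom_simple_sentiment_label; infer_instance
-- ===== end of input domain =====

-- B replaces A's two set intersections and count comparison by a single signed lexicon
-- and one net-score accumulation (objective: simpler).

-- ===== PORT A =====
def pvPositiveWords : PySem.Set String := PySem.Set.ofList
  ["beat", "beats", "surge", "rally", "gain", "gains", "growth", "strong",
   "upgrade", "record", "profit", "profits", "optimism", "bullish",
   "expands", "outperform", "rebound", "boost", "positive"]

def pvNegativeWords : PySem.Set String := PySem.Set.ofList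
  ["miss", "misses", "fall", "falls", "drop", "drops", "weak", "downgrade",
   "loss", "losses", "lawsuit", "risk", "risks", "bearish", "cut", "cuts",
   "decline", "slump", "warning", "negative"]

def simple_sentiment_label (text : String) : String :=
  let tokens : PySem.Set String :=
    PySem.Set.ofList ((PySem.Str.split₀ text).map
      (fun token => PySem.Str.lower (PySem.Str.stripChars token ".,:;!?()[]{}\"'")))
  let pos_score : Int := PySem.Set.len (PySem.Set.inter tokens pvPositiveWords)
  let neg_score : Int := PySem.Set.len (PySem.Set.inter tokens pvNegativeWords)
  if pos_score > neg_score then "Positive"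
  else if neg_score > pos_score then "Negative"
  else "Neutral"

-- ===== PORT B =====
def pvLexicon : PySem.Dict String Int := PySem.Dict.ofList
  [("beat", 1), ("beats", 1), ("surge", 1), ("rally", 1), ("gain", 1), ("gains", 1),
   ("growth", 1), ("strong", 1), ("upgrade", 1), ("record", 1), ("profit", 1),
   ("profits", 1), ("optimism", 1), ("bullish", 1), ("expands", 1),
   ("outperform", 1), ("rebound", 1), ("boost", 1), ("positive", 1),
   ("miss", -1), ("misses", -1), ("fall", -1), ("falls", -1), ("drop", -1),
   ("drops", -1), ("weak", -1), ("downgrade", -1), ("loss", -1), ("losses", -1),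
   ("lawsuit", -1), ("risk", -1), ("risks", -1), ("bearish", -1), ("cut", -1),
   ("cuts", -1), ("decline", -1), ("slump", -1), ("warning", -1), ("negative", -1)]

def simple_sentiment_label_alt (text : String) : String :=
  let tokens : PySem.Set String :=
    PySem.Set.ofList ((PySem.Str.split₀ text).map
      (fun t => PySem.Str.lower (PySem.Str.stripChars t ".,:;!?()[]{}\"'")))
  let score : Int := tokens.foldl (fun s token => s + pvLexicon.getD token 0) 0
  if score > 0 then "Positive"
  else if score < 0 then "Negative"
  else "Neutral"

-- ===== PRECONDITION & SPEC =====
def Spec_simple_sentiment_label (text : String) (out : String) : Prop := out = simple_sentiment_label_alt text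
instance (text : String) (out : String) : Decidable (Spec_simple_sentiment_label text out) := by unfold Spec_simple_sentiment_label; infer_instance

-- ===== CLAIM (what is proved, stated in full; the proofs are below) =====
def Claim_equal_simple_sentiment_label : Prop := ∀ (text : String), Dom_simple_sentiment_label text → Spec_simple_sentiment_label text (simple_sentiment_label text)

-- ===== LEMMAS AND PROOFS =====

-- the word lists behind the two ports' containers
def pvPosL : List String :=
  ["beat", "beats", "surge", "rally", "gain", "gains", "growth", "strong",
   "upgrade", "record", "profit", "profits", "optimism", "bullish",
   "expands", "outperform", "rebound", "boost", "positive"]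

def pvNegL : List String :=
  ["miss", "misses", "fall", "falls", "drop", "drops", "weak", "downgrade",
   "loss", "losses", "lawsuit", "risk", "risks", "bearish", "cut", "cuts",
   "decline", "slump", "warning", "negative"]

-- lookup in a dict of +1-keys followed by -1-keys
lemma pv_get?_signed (P N : List String) (t : String) (hd : ∀ x ∈ P, x ∉ N) :
    (PySem.Dict.mk (P.map (fun w => (w, (1 : Int))) ++ N.map (fun w => (w, (-1 : Int))))).get? t
      = if t ∈ P then some 1 else if t ∈ N then some (-1) else none := by
  induction P with
  | nil =>
    simp only [List.map_nil, List.nil_append, List.not_mem_nil, if_false]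
    induction N with
    | nil => simp [PySem.Dict.get?]
    | cons w N' ihN =>
      rw [List.map_cons, PySem.Dict.get?_mk_cons]
      by_cases h : w = t
      · simp [h]
      · rw [ihN (by simp)]
        simp [beq_iff_eq, h, Ne.symm h]
  | cons w P' ihP =>
    rw [List.map_cons, List.cons_append, PySem.Dict.get?_mk_cons]
    by_cases h : w = t
    · simp [h]
    · rw [ihP (fun x hx => hd x (List.mem_cons_of_mem w hx))]
      simp [beq_iff_eq, h, Ne.symm h]

lemma pv_contains_pos (t : String) : pvPositiveWords.contains t = decide (t ∈ pvPosL) := by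
  by_cases h : t ∈ pvPosL <;> simp_all [pvPositiveWords, PySem.Set.mem_ofList, pvPosL]

lemma pv_contains_neg (t : String) : pvNegativeWords.contains t = decide (t ∈ pvNegL) := by
  by_cases h : t ∈ pvNegL <;> simp_all [pvNegativeWords, PySem.Set.mem_ofList, pvNegL]

-- the signed lexicon looks up +1 on positive words, -1 on negative words, 0 otherwise
set_option maxRecDepth 8000 in
lemma pvLexicon_getD (t : String) :
    pvLexicon.getD t 0 =
      (if pvPositiveWords.contains t then (1 : Int) else 0)
      - (if pvNegativeWords.contains t then (1 : Int) else 0) := by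
  have hmk : pvLexicon
      = PySem.Dict.mk (pvPosL.map (fun w => (w, (1 : Int))) ++ pvNegL.map (fun w => (w, (-1 : Int)))) := by
    decide
  rw [PySem.Dict.getD_eq_get?_getD, hmk, pv_get?_signed _ _ _ (by decide),
    pv_contains_pos, pv_contains_neg]
  by_cases hp : t ∈ pvPosL <;> by_cases hn : t ∈ pvNegL <;> simp [hp, hn]
  exact absurd hn ((by decide : ∀ x ∈ pvPosL, x ∉ pvNegL) t hp)

-- net score over a token list = positive hits minus negative hits
lemma pvScore_eq (l : List String) (a : Int) :
    l.foldl (fun s token => s + pvLexicon.getD token 0) a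
      = a + ((l.filter (fun x => pvPositiveWords.contains x)).length : Int)
          - ((l.filter (fun x => pvNegativeWords.contains x)).length : Int) := by
  induction l generalizing a with
  | nil => simp [List.foldl_nil, List.filter_nil]
  | cons x xs ih =>
    rw [List.foldl_cons, ih, pvLexicon_getD]
    simp only [List.filter_cons]
    split_ifs <;> (try simp only [List.length_cons]) <;> push_cast <;> omega

-- ===== VERDICT (by name: the statement is the Claim_ definition above) =====
theorem simple_sentiment_label_spec : Claim_equal_simple_sentiment_label := by
  intro text _
  unfold Spec_simple_sentiment_label simple_sentiment_label simple_sentiment_label_alt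
  simp only [PySem.Set.len, PySem.Set.inter, pvScore_eq]
  split_ifs <;> first | rfl | omega
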